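-- pv_equiv track=rewrite | github.com/danielpetrov/NebulaTrio | python-service/scoring.py | overall_score
-- ===== SOURCE A (Python) =====
-- def overall_score(scores: list) -> str:
--     vals = [s for s in scores if s]
--     if not vals:
--         return "unknown"
--     if "red" in vals:
--         return "red"
--     if "amber" in vals:
--         return "amber"
--     return "green"
-- ===== SOURCE B (Python) =====
-- def _severity(s) -> int:
--     if not s:
--         return 0
--     if s == "red":
--         return 3
--     if s == "amber":
--         return 2
--     return 1
--
-- def overall_score(scores: list) -> str:
--     rank = 0
--     for s in scores:
--         rank = max(rank, _severity(s))
--     return ("unknown", "green", "amber", "red")[rank]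
-- ===== Notes on version B (the rewrite author's own statement) =====
-- stated objective: alternative
-- what changed: Replaces the filtered list plus ordered membership scans with a max-reduction over a numeric severity ranking (unknown<green<amber<red), decoding the maximum rank back to its label.
import Mathlib
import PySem

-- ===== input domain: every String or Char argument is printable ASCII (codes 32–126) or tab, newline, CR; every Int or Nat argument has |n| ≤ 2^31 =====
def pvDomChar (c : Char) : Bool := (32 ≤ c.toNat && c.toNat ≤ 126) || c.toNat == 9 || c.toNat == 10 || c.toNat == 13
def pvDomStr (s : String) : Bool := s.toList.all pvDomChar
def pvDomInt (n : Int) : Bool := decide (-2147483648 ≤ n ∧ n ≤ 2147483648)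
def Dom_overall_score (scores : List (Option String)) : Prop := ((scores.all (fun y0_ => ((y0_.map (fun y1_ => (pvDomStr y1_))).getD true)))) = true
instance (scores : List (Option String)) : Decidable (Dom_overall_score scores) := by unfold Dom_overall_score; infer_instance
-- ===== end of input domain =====

-- B replaces A's filtered list plus ordered membership scans with a max-reduction over a
-- numeric severity ranking, decoding the maximum rank back to its label (alternative, same cost).

-- ===== PORT A =====
-- vals = [s for s in scores if s]  (truthy = not None and not "")
def overall_score (scores : List (Option String)) : String :=
  let vals := scores.filterMap (fun o => match o with
    | none => none
    | some s => if s = "" then none else some s)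
  if vals = [] then "unknown"
  else if vals.contains "red" then "red"
  else if vals.contains "amber" then "amber"
  else "green"

-- ===== PORT B =====
-- _severity: 0 for falsy, 3 for "red", 2 for "amber", 1 otherwise
def pvSeverity (o : Option String) : Nat :=
  match o with
  | none => 0
  | some s => if s = "" then 0 else if s = "red" then 3 else if s = "amber" then 2 else 1

-- rank = max over severities; decode via the label table (getD default is a totality
-- guard only: rank is always ≤ 3, as in the Python tuple indexing)
def overall_score_alt (scores : List (Option String)) : String :=
  let rank := scores.foldl (fun r o => Nat.max r (pvSeverity o)) 0
  [("unknown" : String), "green", "amber", "red"].getD rank "unknown"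

-- ===== PRECONDITION & SPEC =====
def Spec_overall_score (scores : List (Option String)) (out : String) : Prop := out = overall_score_alt scores
instance (scores : List (Option String)) (out : String) : Decidable (Spec_overall_score scores out) := by unfold Spec_overall_score; infer_instance

-- ===== CLAIM (what is proved, stated in full; the proofs are below) =====
def Claim_equal_overall_score : Prop := ∀ (scores : List (Option String)), Dom_overall_score scores → Spec_overall_score scores (overall_score scores)

-- ===== LEMMAS AND PROOFS =====

-- the truthy filter A applies (proof-side abbreviation)
def pvVals (scores : List (Option String)) : List String :=
  scores.filterMap (fun o => match o with
    | none => none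
    | some s => if s = "" then none else some s)

-- closed form of the maximum severity, over A's filtered list
def pvRank (l : List String) : Nat :=
  if l.contains "red" then 3
  else if l.contains "amber" then 2
  else if l = [] then 0 else 1

-- folding max from any start value a is max a (fold from 0)
theorem pv_foldl_max_init (scores : List (Option String)) (a : Nat) :
    scores.foldl (fun r o => Nat.max r (pvSeverity o)) a
      = Nat.max a (scores.foldl (fun r o => Nat.max r (pvSeverity o)) 0) := by
  induction scores generalizing a with
  | nil => simp
  | cons h t ih =>
    simp only [List.foldl_cons]
    rw [ih (Nat.max a (pvSeverity h)), ih (Nat.max 0 (pvSeverity h))]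
    simp [Nat.max_assoc]

-- one step of the closed form for a truthy string
theorem pv_rank_cons (s : String) (l : List String) (h0 : s ≠ "") :
    Nat.max (pvSeverity (some s)) (pvRank l) = pvRank (s :: l) := by
  unfold pvSeverity pvRank
  simp only [List.contains_cons, if_neg h0]
  by_cases hr : s = "red"
  · subst hr
    simp only [BEq.rfl, Bool.true_or, if_true]
    split_ifs <;> decide
  · by_cases hm : s = "amber"
    · subst hm
      have : ("red" == "amber") = false := by decide
      simp only [this, BEq.rfl, Bool.false_or, Bool.true_or, if_neg hr]
      split_ifs <;> decide
    · have h1 : ("red" == s) = false := by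
        simp [beq_eq_false_iff_ne]; exact fun e => hr e.symm
      have h2 : ("amber" == s) = false := by
        simp [beq_eq_false_iff_ne]; exact fun e => hm e.symm
      simp only [h1, h2, Bool.false_or, if_neg hr, if_neg hm]
      split_ifs <;> simp_all

-- the fold computes pvRank of A's filtered list
theorem pv_max_char (scores : List (Option String)) :
    scores.foldl (fun r o => Nat.max r (pvSeverity o)) 0 = pvRank (pvVals scores) := by
  induction scores with
  | nil => simp [pvVals, pvRank]
  | cons h t ih =>
    simp only [List.foldl_cons]
    rw [pv_foldl_max_init, ih]
    cases h with
    | none => simp [pvVals, pvSeverity]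
    | some s =>
      by_cases h0 : s = ""
      · simp [pvVals, pvSeverity, h0]
      · have : pvVals (some s :: t) = s :: pvVals t := by
          simp [pvVals, h0]
        rw [this, ← pv_rank_cons s (pvVals t) h0]
        simp [pvSeverity]

-- decoding the closed-form rank gives exactly A's branch result
theorem pv_decode (l : List String) :
    (if l = [] then "unknown"
     else if l.contains "red" then "red"
     else if l.contains "amber" then "amber"
     else "green")
    = ([("unknown" : String), "green", "amber", "red"].getD (pvRank l) "unknown") := by
  unfold pvRank
  by_cases he : l = []
  · subst he; simp
  · by_cases hr : "red" ∈ l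
    · simp [he, hr]
    · by_cases hm : "amber" ∈ l
      · simp [he, hr, hm]
      · simp [he, hr, hm]

-- ===== VERDICT (by name: the statement is the Claim_ definition above) =====
theorem overall_score_spec : Claim_equal_overall_score := by
  intro scores _
  show overall_score scores = overall_score_alt scores
  unfold overall_score overall_score_alt
  rw [pv_max_char]
  exact pv_decode (pvVals scores)
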